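-- pv_equiv track=rewrite | github.com/pseusys/current | sem9/algo-lab2/algo.py | calculate
-- ===== SOURCE A (Python) =====
-- from typing import Tuple
--
-- def separate(string: str) -> Tuple[int, int, int]:
--     """
--     Separate 0s from 1s in a string.
--     Calculates number of ones and zeros in a string.
--     :return: tuple, first element is number of 0s, second is number of 1s, third is total length.
--     """
--     result = [0, 0]
--     for char in string:
--         result[0 if char == "0" else 1] += 1
--     return *result, len(string)
--
-- def calculate(string: str) -> int:
--     """
--     Calculate maximum sellable candy length.
--     """
--     table = [0] * len(string)
--     for n in range(len(string)):
--         for i in range(n + 1):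
--             tail_zeros, tail_ones, total = separate(string[i:n + 1])
--             tail = total if tail_ones > tail_zeros else 0
--             result = table[i - 1] + tail
--             if result > table[n]:
--                 table[n] = result
--     return table[-1]
-- ===== SOURCE B (Python) =====
-- def calculate(string: str) -> int:
--     """
--     Calculate maximum sellable candy length.
--     O(n^2): prefix sums of (ones - zeros) give each substring's balance in O(1),
--     and f[k] = best for the first k characters.
--     """
--     n = len(string)
--     prefix = [0]
--     for ch in string:
--         prefix.append(prefix[-1] + (-1 if ch == "0" else 1))
--     f = [0]
--     for k in range(1, n + 1):
--         best = f[k - 1]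
--         for i in range(k):
--             if prefix[k] - prefix[i] > 0:
--                 cand = f[i] + (k - i)
--                 if cand > best:
--                     best = cand
--         f.append(best)
--     return f[n]
-- ===== Notes on version B (the rewrite author's own statement) =====
-- stated objective: faster
-- what changed: Replaces A's per-pair substring recount (separate on string[i:n+1] inside two nested loops) by precomputed prefix sums of (ones - zeros), so each substring's balance is an O(1) subtraction; the non-profitable i-candidates collapse into the single seed f[k-1].
import Mathlib
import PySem

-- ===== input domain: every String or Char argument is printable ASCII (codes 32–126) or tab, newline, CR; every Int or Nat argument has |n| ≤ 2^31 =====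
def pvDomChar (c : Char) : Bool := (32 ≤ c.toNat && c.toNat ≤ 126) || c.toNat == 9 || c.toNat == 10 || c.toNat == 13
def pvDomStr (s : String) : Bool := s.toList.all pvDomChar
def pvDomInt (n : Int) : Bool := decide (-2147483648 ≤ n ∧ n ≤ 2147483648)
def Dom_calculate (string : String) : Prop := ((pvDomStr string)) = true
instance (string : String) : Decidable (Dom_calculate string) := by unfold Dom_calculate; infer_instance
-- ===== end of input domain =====

-- B replaces A's per-substring recount (separate(string[i:n+1]) inside two nested loops)
-- by precomputed prefix sums of (ones - zeros); same values, fewer passes.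

-- ===== PORT A =====
-- Python's list [zeros, ones] is carried as a pair (zeros, ones); the returned triple is (zeros, ones, len).
def pvSeparate (s : List Char) : Int × Int × Int :=
  let r := s.foldl (fun (r : Int × Int) c => if c = '0' then (r.1 + 1, r.2) else (r.1, r.2 + 1)) (0, 0)
  (r.1, r.2, (s.length : Int))

-- literal port of A; list reads use pyGetD (in range on every input A returns on; the final
-- table[-1] is the IndexError on the empty string, excluded by Pre_)
def calculate (string : String) : Int :=
  let cs := string.toList
  let table : List Int := List.replicate cs.length 0
  let table := (List.range cs.length).foldl (fun (table : List Int) (n : Nat) =>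
    (List.range (n + 1)).foldl (fun (table : List Int) (i : Nat) =>
      let sep := pvSeparate (PySem.List.slice cs (some (i : Int)) (some ((n : Int) + 1)))
      let tail := if sep.2.1 > sep.1 then sep.2.2 else (0 : Int)
      let result := PySem.List.pyGetD table ((i : Int) - 1) 0 + tail
      if result > PySem.List.pyGetD table (n : Int) 0 then table.set n result else table) table) table
  PySem.List.pyGetD table (-1) 0

-- ===== PORT B =====
def calculate_alt (string : String) : Int :=
  let cs := string.toList
  let n := cs.length
  let pre := cs.foldl (fun (p : List Int) ch =>
    p ++ [PySem.List.pyGetD p (-1) 0 + (if ch = '0' then (-1 : Int) else 1)]) [0]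
  let f := (PySem.List.pyRange 1 ((n : Int) + 1) 1).foldl (fun (f : List Int) (k : Int) =>
    let best := (List.range k.toNat).foldl (fun (best : Int) (i : Nat) =>
      if PySem.List.pyGetD pre k 0 - PySem.List.pyGetD pre (i : Int) 0 > 0 then
        let cand := PySem.List.pyGetD f (i : Int) 0 + (k - (i : Int))
        if cand > best then cand else best
      else best) (PySem.List.pyGetD f (k - 1) 0)
    f ++ [best]) [0]
  PySem.List.pyGetD f (n : Int) 0

-- ===== PRECONDITION & SPEC =====
-- Pre_ excludes only the empty string, on which A raises IndexError (table[-1] on an empty table).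
def Pre_calculate (string : String) : Prop := string.toList ≠ []
instance (string : String) : Decidable (Pre_calculate string) := by unfold Pre_calculate; infer_instance
def pvWitness_calculate : String := "0110"

def Spec_calculate (string : String) (out : Int) : Prop := out = calculate_alt string
instance (string : String) (out : Int) : Decidable (Spec_calculate string out) := by unfold Spec_calculate; infer_instance

-- ===== CLAIM (what is proved, stated in full; the proofs are below) =====
def Claim_equal_calculate : Prop := ∀ (string : String), Dom_calculate string → Pre_calculate string → Spec_calculate string (calculate string)

-- ===== LEMMAS AND PROOFS =====

-- weight of a character: +1 for a "one" (any non-'0' char), -1 for a zero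
def pvWt (c : Char) : Int := if c = '0' then -1 else 1
-- prefix balance: (ones - zeros) among the first k characters
def pvD (cs : List Char) (k : Nat) : Int := ((cs.take k).map pvWt).sum
-- A's "tail" value for the segment [i, k)
def pvTail (cs : List Char) (i k : Nat) : Int := if pvD cs k - pvD cs i > 0 then ((k : Int) - (i : Int)) else 0
-- reference DP: pvG cs k = best total for the first k characters
def pvGstep (cs : List Char) (t : List Int) : Int :=
  (List.range t.length).foldl (fun b i => max b (t.getD i 0 + pvTail cs i t.length)) 0
def pvGtab (cs : List Char) : Nat → List Int
  | 0 => [0]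
  | k+1 => pvGtab cs k ++ [pvGstep cs (pvGtab cs k)]
def pvG (cs : List Char) (k : Nat) : Int := (pvGtab cs k).getD k 0

lemma pvGtab_length (cs : List Char) (k : Nat) : (pvGtab cs k).length = k + 1 := by
  induction k with
  | zero => rfl
  | succ k ih => simp [pvGtab, ih]

lemma pvGtab_getD (cs : List Char) (k i : Nat) (h : i ≤ k) : (pvGtab cs k).getD i 0 = pvG cs i := by
  induction k with
  | zero => interval_cases i; rfl
  | succ k ih =>
    rcases Nat.lt_or_ge i (k+1) with h' | h'
    · have hl : i < (pvGtab cs k).length := by rw [pvGtab_length]; omega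
      rw [pvGtab, List.getD_append _ _ _ _ hl, ih (by omega)]
    · have : i = k + 1 := by omega
      subst this; rfl

lemma pvG_succ (cs : List Char) (k : Nat) :
    pvG cs (k+1) = (List.range (k+1)).foldl (fun b i => max b (pvG cs i + pvTail cs i (k+1))) 0 := by
  have hlen := pvGtab_length cs k
  have h1 : pvG cs (k+1) = pvGstep cs (pvGtab cs k) := by
    rw [pvG, show pvGtab cs (k+1) = pvGtab cs k ++ [pvGstep cs (pvGtab cs k)] from rfl]
    simp [List.getD, hlen]
  rw [h1]
  unfold pvGstep
  rw [hlen]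
  exact List.foldl_ext _ _ 0 (fun a i hi => by
    rw [pvGtab_getD cs k i (by simpa using Nat.lt_succ_iff.1 (List.mem_range.1 hi))])

-- foldl-max toolkit
lemma pvInit_le_foldl_max (l : List Int) (b : Int) : b ≤ l.foldl max b := by
  induction l generalizing b with
  | nil => simp
  | cons x xs ih => exact le_trans (le_max_left b x) (ih (max b x))

lemma pvMem_le_foldl_max (l : List Int) : ∀ (b x : Int), x ∈ l → x ≤ l.foldl max b := by
  induction l with
  | nil => intro b x h; simp at h
  | cons y ys ih =>
    intro b x h
    rcases List.mem_cons.1 h with rfl | h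
    · exact le_trans (le_max_right b x) (pvInit_le_foldl_max ys (max b x))
    · exact ih (max b y) x h

lemma pvFoldl_max_le (l : List Int) : ∀ (b m : Int), b ≤ m → (∀ x ∈ l, x ≤ m) → l.foldl max b ≤ m := by
  induction l with
  | nil => intro b m hb _; simpa
  | cons y ys ih =>
    intro b m hb h
    exact ih (max b y) m (max_le hb (h y (by simp))) (fun x hx => h x (by simp [hx]))

lemma pvFoldl_max_map (c : Nat → Int) (k : Nat) (b : Int) :
    (List.range k).foldl (fun x i => max x (c i)) b = ((List.range k).map c).foldl max b := by
  rw [List.foldl_map]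

lemma pvTail_nonneg (cs : List Char) (i k : Nat) (h : i ≤ k) : 0 ≤ pvTail cs i k := by
  unfold pvTail; split
  · omega
  · rfl

lemma pvG_zero (cs : List Char) : pvG cs 0 = 0 := rfl

lemma pvG_le_succ (cs : List Char) (k : Nat) : pvG cs k ≤ pvG cs (k+1) := by
  rw [pvG_succ, pvFoldl_max_map (fun i => pvG cs i + pvTail cs i (k+1))]
  refine le_trans ?_ (pvMem_le_foldl_max _ 0 (pvG cs k + pvTail cs k (k+1)) ?_)
  · have := pvTail_nonneg cs k (k+1) (by omega); omega
  · exact List.mem_map.2 ⟨k, List.mem_range.2 (by omega), rfl⟩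

lemma pvG_mono (cs : List Char) (i k : Nat) (h : i ≤ k) : pvG cs i ≤ pvG cs k := by
  induction k with
  | zero => interval_cases i; rfl
  | succ k ih =>
    rcases Nat.lt_or_ge i (k+1) with h' | h'
    · exact le_trans (ih (by omega)) (pvG_le_succ cs k)
    · have : i = k + 1 := by omega
      subst this; rfl

lemma pvG_nonneg (cs : List Char) (k : Nat) : 0 ≤ pvG cs k := pvG_mono cs 0 k (Nat.zero_le k)

-- separate: ones - zeros is the summed weight
lemma pvSeparate_fold (s : List Char) : ∀ (a b : Int),
    (s.foldl (fun (r : Int × Int) c => if c = '0' then (r.1 + 1, r.2) else (r.1, r.2 + 1)) (a, b)).2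
      - (s.foldl (fun (r : Int × Int) c => if c = '0' then (r.1 + 1, r.2) else (r.1, r.2 + 1)) (a, b)).1
      = (b - a) + (s.map pvWt).sum := by
  induction s with
  | nil => intro a b; simp
  | cons c cs ih =>
    intro a b
    by_cases hc : c = '0' <;> simp [hc, pvWt, ih] <;> ring

lemma pvSeparate_diff (s : List Char) :
    (pvSeparate s).2.1 - (pvSeparate s).1 = (s.map pvWt).sum := by
  unfold pvSeparate
  simpa using pvSeparate_fold s 0 0

lemma pvSeparate_total (s : List Char) : (pvSeparate s).2.2 = (s.length : Int) := rfl

-- balance of a contiguous segment via prefix balances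
lemma pvD_segment (cs : List Char) (i k : Nat) (h : i ≤ k) :
    (((cs.drop i).take (k - i)).map pvWt).sum = pvD cs k - pvD cs i := by
  have hs : cs.take k = cs.take i ++ (cs.drop i).take (k - i) := by
    rw [← List.take_add]; congr 1; omega
  unfold pvD; rw [hs]; simp

-- the slice A takes, identified: its "tail" equals pvTail
lemma pvA_tail (cs : List Char) (i n : Nat) (hi : i ≤ n) (hn : n < cs.length) :
    (if (pvSeparate (PySem.List.slice cs (some (i : Int)) (some ((n : Int) + 1)))).2.1 >
        (pvSeparate (PySem.List.slice cs (some (i : Int)) (some ((n : Int) + 1)))).1 then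
      (pvSeparate (PySem.List.slice cs (some (i : Int)) (some ((n : Int) + 1)))).2.2 else 0)
    = pvTail cs i (n+1) := by
  have hcast : ((n : Int) + 1) = ((n + 1 : Nat) : Int) := by push_cast; ring
  rw [hcast, PySem.List.slice_natCast]
  have hd := pvSeparate_diff ((cs.drop i).take (n + 1 - i))
  have hseg := pvD_segment cs i (n+1) (by omega)
  have hlen : ((cs.drop i).take (n + 1 - i)).length = n + 1 - i := by
    simp; omega
  have hcond : ((pvSeparate ((cs.drop i).take (n + 1 - i))).2.1 >
      (pvSeparate ((cs.drop i).take (n + 1 - i))).1) ↔ (pvD cs (n+1) - pvD cs i > 0) := by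
    rw [← hseg, ← hd]; omega
  unfold pvTail
  by_cases hgood : pvD cs (n+1) - pvD cs i > 0
  · rw [if_pos (hcond.2 hgood), if_pos hgood, pvSeparate_total, hlen]
    push_cast; omega
  · rw [if_neg (fun h => hgood (hcond.1 h)), if_neg hgood]

-- the table A maintains after n outer iterations
def pvTbl (cs : List Char) (n : Nat) : List Int :=
  (List.range cs.length).map (fun j => if j < n then pvG cs (j+1) else 0)

-- A's inner running maximum after k inner iterations of outer round n
def pvPm (cs : List Char) (n k : Nat) : Int :=
  (List.range k).foldl (fun b i => max b (pvG cs i + pvTail cs i (n+1))) 0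

lemma pvIf_gt_eq_max (a b : Int) : (if a > b then a else b) = max b a := by
  rcases lt_or_ge b a with h | h
  · rw [if_pos h, max_eq_right h.le]
  · rw [if_neg (not_lt.2 h), max_eq_left h]

lemma pvTbl_length (cs : List Char) (n : Nat) : (pvTbl cs n).length = cs.length := by
  simp [pvTbl]

lemma pvTbl_getD (cs : List Char) (n j : Nat) (hj : j < cs.length) :
    (pvTbl cs n).getD j 0 = if j < n then pvG cs (j+1) else 0 :=
  PySem.List.getD_map_range _ _ _ _ hj

lemma pvGetD_set_self (l : List Int) (i : Nat) (v : Int) (h : i < l.length) :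
    (l.set i v).getD i 0 = v := by
  simp [List.getD, h]

lemma pvGetD_set_ne (l : List Int) (i j : Nat) (v : Int) (h : j ≠ i) :
    (l.set i v).getD j 0 = l.getD j 0 := by
  simp [List.getD]
  rw [List.getElem?_set]
  rw [if_neg (by omega)]

lemma pvPm_zero (cs : List Char) (n : Nat) : pvPm cs n 0 = 0 := rfl

lemma pvPm_succ (cs : List Char) (n k : Nat) :
    pvPm cs n (k+1) = max (pvPm cs n k) (pvG cs k + pvTail cs k (n+1)) := by
  unfold pvPm
  rw [List.range_succ, List.foldl_append]
  rfl

lemma pvTbl_set_zero (cs : List Char) (n : Nat) (_hn : n < cs.length) :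
    (pvTbl cs n).set n 0 = pvTbl cs n := by
  apply List.ext_getElem
  · simp
  · intro j h1 h2
    rw [List.getElem_set]
    split
    · next h => subst h; simp [pvTbl]
    · rfl

lemma pvTbl_set_succ (cs : List Char) (n : Nat) (_hn : n < cs.length) :
    (pvTbl cs n).set n (pvG cs (n+1)) = pvTbl cs (n+1) := by
  apply List.ext_getElem
  · simp [pvTbl]
  · intro j h1 h2
    rw [List.getElem_set]
    have hj : j < cs.length := by simpa [pvTbl] using h2
    simp only [pvTbl, List.getElem_map, List.getElem_range]
    split
    · next h => subst h; simp
    · next h =>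
      rcases Nat.lt_or_ge j n with h' | h'
      · rw [if_pos h', if_pos (by omega)]
      · rw [if_neg (by omega), if_neg (by omega)]

-- getLast of the n-th table is 0 while n < length (the slots ≥ n are still 0)
lemma pvTbl_getLast (cs : List Char) (n : Nat) (hn : n < cs.length) (h : pvTbl cs n ≠ []) :
    (pvTbl cs n).getLast h = 0 := by
  rw [List.getLast_eq_getElem]
  have hl : (pvTbl cs n).length = cs.length := pvTbl_length cs n
  simp only [pvTbl, List.getElem_map, List.getElem_range]
  rw [if_neg (by simp [pvTbl] at hl ⊢; omega)]

-- ONE inner round of A, fully characterised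
lemma pvA_inner (cs : List Char) (n : Nat) (hn : n < cs.length) :
    ∀ k, k ≤ n + 1 →
    (List.range k).foldl (fun (table : List Int) (i : Nat) =>
      let sep := pvSeparate (PySem.List.slice cs (some (i : Int)) (some ((n : Int) + 1)))
      let tail := if sep.2.1 > sep.1 then sep.2.2 else (0 : Int)
      let result := PySem.List.pyGetD table ((i : Int) - 1) 0 + tail
      if result > PySem.List.pyGetD table (n : Int) 0 then table.set n result else table)
      (pvTbl cs n)
    = (pvTbl cs n).set n (pvPm cs n k) := by
  intro k hk
  induction k with
  | zero =>
    simp only [List.range_zero, List.foldl_nil, pvPm_zero]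
    exact (pvTbl_set_zero cs n hn).symm
  | succ k ih =>
    rw [List.range_succ, List.foldl_append, ih (by omega)]
    simp only [List.foldl_cons, List.foldl_nil]
    -- the two reads
    have hlenS : ((pvTbl cs n).set n (pvPm cs n k)).length = cs.length := by
      simp [pvTbl_length]
    have hr2 : PySem.List.pyGetD ((pvTbl cs n).set n (pvPm cs n k)) (n : Int) 0 = pvPm cs n k := by
      rw [PySem.List.pyGetD_natCast]
      exact pvGetD_set_self _ _ _ (by rw [pvTbl_length]; omega)
    have hr1 : PySem.List.pyGetD ((pvTbl cs n).set n (pvPm cs n k)) ((k : Int) - 1) 0 = pvG cs k := by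
      cases k with
      | zero =>
        rw [pvPm_zero, pvTbl_set_zero cs n hn]
        have hne : pvTbl cs n ≠ [] := by
          intro h; have := pvTbl_length cs n; rw [h] at this; simp at this; omega
        norm_num
        rw [PySem.List.pyGetD_neg_one _ _ hne]
        rw [pvTbl_getLast cs n hn hne, pvG_zero]
      | succ k' =>
        have hcast : ((k' + 1 : Nat) : Int) - 1 = ((k' : Nat) : Int) := by push_cast; ring
        rw [hcast, PySem.List.pyGetD_natCast, pvGetD_set_ne _ _ _ _ (by omega),
          pvTbl_getD cs n k' (by omega), if_pos (by omega)]
    rw [hr1, hr2, pvA_tail cs k n (by omega) hn]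
    rw [pvPm_succ]
    by_cases hgt : pvG cs k + pvTail cs k (n+1) > pvPm cs n k
    · rw [if_pos hgt, List.set_set, max_eq_right hgt.le]
    · rw [if_neg hgt, max_eq_left (not_lt.1 hgt)]

-- A's whole outer loop
lemma pvA_outer (cs : List Char) : ∀ n, n ≤ cs.length →
    (List.range n).foldl (fun table n =>
      (List.range (n + 1)).foldl (fun (table : List Int) (i : Nat) =>
        let sep := pvSeparate (PySem.List.slice cs (some (i : Int)) (some ((n : Int) + 1)))
        let tail := if sep.2.1 > sep.1 then sep.2.2 else (0 : Int)
        let result := PySem.List.pyGetD table ((i : Int) - 1) 0 + tail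
        if result > PySem.List.pyGetD table (n : Int) 0 then table.set n result else table) table)
      (List.replicate cs.length 0)
    = pvTbl cs n := by
  intro n hn
  induction n with
  | zero =>
    simp only [List.range_zero, List.foldl_nil]
    simp [pvTbl, List.map_const']
  | succ n ih =>
    rw [List.range_succ, List.foldl_append, ih (by omega)]
    simp only [List.foldl_cons, List.foldl_nil]
    rw [pvA_inner cs n (by omega) (n+1) (le_refl _)]
    have : pvPm cs n (n+1) = pvG cs (n+1) := (pvG_succ cs n).symm
    rw [this, pvTbl_set_succ cs n (by omega)]

-- A computes pvG on the whole string
lemma pvA_eq (string : String) (h : string.toList ≠ []) :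
    calculate string = pvG string.toList string.toList.length := by
  simp only [calculate]
  rw [pvA_outer string.toList string.toList.length (le_refl _)]
  have hpos : 0 < string.toList.length := by
    cases hcs : string.toList with
    | nil => exact absurd hcs h
    | cons a l => simp
  obtain ⟨L', hL⟩ : ∃ L', string.toList.length = L' + 1 :=
    ⟨string.toList.length - 1, by omega⟩
  rw [pvTbl, hL, List.range_succ, List.map_append, List.map_cons, List.map_nil,
    PySem.List.pyGetD_neg_one_append_singleton, if_pos (by omega)]

-- ===== B side =====

-- B's prefix list is the list of prefix balances
lemma pvB_prefix (cs : List Char) :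
    cs.foldl (fun (p : List Int) ch =>
      p ++ [PySem.List.pyGetD p (-1) 0 + (if ch = '0' then (-1 : Int) else 1)]) [0]
    = (List.range (cs.length + 1)).map (pvD cs) := by
  induction cs using List.reverseRecOn with
  | nil => simp [pvD]
  | append_singleton ds c ih =>
    rw [List.foldl_append, ih]
    simp only [List.foldl_cons, List.foldl_nil]
    have hsplit : (List.range (ds.length + 1)).map (pvD ds)
        = (List.range ds.length).map (pvD ds) ++ [pvD ds ds.length] := by
      rw [List.range_succ, List.map_append, List.map_cons, List.map_nil]
    have hstep : ∀ k ≤ ds.length, pvD (ds ++ [c]) k = pvD ds k := by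
      intro k hk
      unfold pvD
      rw [List.take_append_of_le_length hk]
    have hnew : pvD (ds ++ [c]) (ds.length + 1) = pvD ds ds.length + pvWt c := by
      unfold pvD
      rw [List.take_of_length_le (by simp), List.map_append, List.sum_append,
        List.take_of_length_le (le_refl ds.length)]
      simp
    have hread : PySem.List.pyGetD ((List.range (ds.length + 1)).map (pvD ds)) (-1) 0
        = pvD ds ds.length := by
      rw [hsplit, PySem.List.pyGetD_neg_one_append_singleton]
    rw [hread]
    have hlen2 : (ds ++ [c]).length + 1 = (ds.length + 1) + 1 := by simp
    rw [hlen2]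
    conv_rhs => rw [List.range_succ, List.map_append, List.map_cons, List.map_nil]
    congr 1
    · exact (List.map_congr_left (fun k hk =>
        hstep k (by simpa using Nat.lt_succ_iff.1 (List.mem_range.1 hk)))).symm
    · rw [hnew]
      unfold pvWt
      rfl

-- the max-equality at the heart of the rewrite: B's seeded fold over profitable i equals A's fold
lemma pvBmax (cs : List Char) (k : Nat) :
    (List.range (k+1)).foldl (fun b i =>
      if pvD cs (k+1) - pvD cs i > 0 then max b (pvG cs i + pvTail cs i (k+1)) else b)
      (pvG cs k)
    = pvG cs (k+1) := by
  -- turn the conditional step into a fold over the filtered list, then into foldl max over mapped values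
  have hfilter : (List.range (k+1)).foldl (fun b i =>
      if pvD cs (k+1) - pvD cs i > 0 then max b (pvG cs i + pvTail cs i (k+1)) else b) (pvG cs k)
      = (((List.range (k+1)).filter (fun i => decide (pvD cs (k+1) - pvD cs i > 0))).map
          (fun i => pvG cs i + pvTail cs i (k+1))).foldl max (pvG cs k) := by
    rw [List.foldl_map, List.foldl_filter]
    exact (List.foldl_ext _ _ _ (fun a i _ => by simp)).symm
  rw [hfilter, pvG_succ cs k, pvFoldl_max_map (fun i => pvG cs i + pvTail cs i (k+1))]
  apply le_antisymm
  · -- B ≤ A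
    apply pvFoldl_max_le
    · -- pvG cs k ≤ A's fold: the i = k candidate dominates it
      refine le_trans ?_ (pvMem_le_foldl_max _ 0 (pvG cs k + pvTail cs k (k+1))
        (List.mem_map.2 ⟨k, List.mem_range.2 (by omega), rfl⟩))
      have := pvTail_nonneg cs k (k+1) (by omega); omega
    · intro x hx
      rcases List.mem_map.1 hx with ⟨i, hi, rfl⟩
      exact pvMem_le_foldl_max _ 0 _ (List.mem_map.2 ⟨i, List.mem_filter.1 hi |>.1, rfl⟩)
  · -- A ≤ B
    apply pvFoldl_max_le
    · exact le_trans (pvG_nonneg cs k) (pvInit_le_foldl_max _ _)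
    · intro x hx
      rcases List.mem_map.1 hx with ⟨i, hi, rfl⟩
      have hik : i ≤ k := by simpa using Nat.lt_succ_iff.1 (List.mem_range.1 hi)
      by_cases hg : pvD cs (k+1) - pvD cs i > 0
      · exact pvMem_le_foldl_max _ _ _ (List.mem_map.2
          ⟨i, List.mem_filter.2 ⟨hi, by simpa using hg⟩, rfl⟩)
      · -- not profitable: the candidate is just pvG cs i ≤ pvG cs k ≤ seed
        have : pvTail cs i (k+1) = 0 := by unfold pvTail; rw [if_neg hg]
        rw [this, add_zero]
        exact le_trans (pvG_mono cs i k hik) (pvInit_le_foldl_max _ _)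

-- B's f loop invariant
lemma pvB_f (cs : List Char) : ∀ m, m ≤ cs.length →
    ((List.range m).map (fun j => (1 : Int) + (j : Nat))).foldl (fun (f : List Int) k =>
      let best := (List.range k.toNat).foldl (fun (best : Int) (i : Nat) =>
        if PySem.List.pyGetD ((List.range (cs.length + 1)).map (pvD cs)) k 0
            - PySem.List.pyGetD ((List.range (cs.length + 1)).map (pvD cs)) (i : Int) 0 > 0 then
          let cand := PySem.List.pyGetD f (i : Int) 0 + (k - (i : Int))
          if cand > best then cand else best
        else best) (PySem.List.pyGetD f (k - 1) 0)
      f ++ [best]) [0]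
    = (List.range (m+1)).map (pvG cs) := by
  intro m hm
  induction m with
  | zero => simp [pvG_zero]
  | succ m ih =>
    have hlist : (List.range (m+1)).map (fun j : Nat => (1 : Int) + (j : Nat))
        = (List.range m).map (fun j : Nat => (1 : Int) + (j : Nat)) ++ [(1 : Int) + (m : Nat)] := by
      rw [List.range_succ, List.map_append, List.map_cons, List.map_nil]
    rw [hlist, List.foldl_append, ih (by omega)]
    simp only [List.foldl_cons, List.foldl_nil]
    have htoNat : ((1 : Int) + (m : Nat)).toNat = m + 1 := by omega
    have hseed : PySem.List.pyGetD ((List.range (m+1)).map (pvG cs)) ((1 : Int) + (m : Nat) - 1) 0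
        = pvG cs m := by
      rw [show (1 : Int) + (m : Nat) - 1 = ((m : Nat) : Int) by ring]
      rw [PySem.List.pyGetD_natCast]
      exact PySem.List.getD_map_range _ _ _ _ (by omega)
    have hpreK : PySem.List.pyGetD ((List.range (cs.length + 1)).map (pvD cs)) ((1 : Int) + (m : Nat)) 0
        = pvD cs (m+1) := by
      rw [show (1 : Int) + (m : Nat) = ((m + 1 : Nat) : Int) by push_cast; ring]
      rw [PySem.List.pyGetD_natCast]
      exact PySem.List.getD_map_range _ _ _ _ (by omega)
    rw [htoNat, hseed]
    have hbody : (List.range (m+1)).foldl (fun (best : Int) (i : Nat) =>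
        if PySem.List.pyGetD ((List.range (cs.length + 1)).map (pvD cs)) ((1 : Int) + (m : Nat)) 0
            - PySem.List.pyGetD ((List.range (cs.length + 1)).map (pvD cs)) (i : Int) 0 > 0 then
          let cand := PySem.List.pyGetD ((List.range (m+1)).map (pvG cs)) (i : Int) 0
            + ((1 : Int) + (m : Nat) - (i : Int))
          if cand > best then cand else best
        else best) (pvG cs m)
        = pvG cs (m+1) := by
      rw [← pvBmax cs m]
      apply List.foldl_ext
      intro b i hi
      have hik : i ≤ m := by simpa using Nat.lt_succ_iff.1 (List.mem_range.1 hi)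
      rw [hpreK, PySem.List.pyGetD_natCast, PySem.List.getD_map_range _ _ _ _ (by omega)]
      rw [PySem.List.pyGetD_natCast, PySem.List.getD_map_range _ _ _ _ (by omega)]
      by_cases hg : pvD cs (m+1) - pvD cs i > 0
      · rw [if_pos hg, if_pos hg]
        simp only []
        rw [pvIf_gt_eq_max]
        congr 1
        unfold pvTail
        rw [if_pos hg]
        push_cast; ring
      · rw [if_neg hg, if_neg hg]
    rw [hbody]
    conv_rhs => rw [List.range_succ, List.map_append, List.map_cons, List.map_nil]

-- B computes pvG on the whole string
lemma pvB_eq (string : String) :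
    calculate_alt string = pvG string.toList string.toList.length := by
  simp only [calculate_alt]
  rw [pvB_prefix string.toList]
  rw [PySem.List.pyRange_one]
  rw [show ((string.toList.length : Int) + 1 - 1).toNat = string.toList.length by omega]
  rw [pvB_f string.toList string.toList.length (le_refl _)]
  rw [PySem.List.pyGetD_natCast]
  exact PySem.List.getD_map_range _ _ _ _ (by omega)

-- ===== VERDICT (by name: the statement is the Claim_ definition above) =====
theorem calculate_spec : Claim_equal_calculate := by
  intro string _ hpre
  unfold Spec_calculate
  rw [pvA_eq string hpre, pvB_eq string]
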